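-- pv_equiv track=rewrite | github.com/AlanVek/Proyectos-Viejos-Python | llalala.py | sumamat
-- ===== SOURCE A (Python) =====
-- def sumamat(a,b):
-- 	matriz=[]
-- 	for i in range (0,len(a)):
-- 		lista=[]
-- 		for j in range (0,len(a[0])):
-- 			lista+=[a[i][j]+b[j][i]]
-- 		matriz+=[lista]
-- 	return (matriz)
-- ===== SOURCE B (Python) =====
-- def sumamat(a, b):
--     if not a:
--         return []
--     n, m = len(a), len(a[0])
--     # pass 1: column-major — build cols[j] = [a[i][j] + b[j][i] for each row i]
--     cols = [[a[i][j] + b[j][i] for i in range(n)] for j in range(m)]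
--     # pass 2: transpose the column table back into row order
--     return [[cols[j][i] for j in range(m)] for i in range(n)]
-- ===== Notes on version B (the rewrite author's own statement) =====
-- stated objective: alternative
-- what changed: B traverses column-major, building the whole column table cols[j][i]=a[i][j]+b[j][i] in a first pass, then transposes it back by indexing in a second pass, instead of A's fused row-major single nested loop.
import Mathlib
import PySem

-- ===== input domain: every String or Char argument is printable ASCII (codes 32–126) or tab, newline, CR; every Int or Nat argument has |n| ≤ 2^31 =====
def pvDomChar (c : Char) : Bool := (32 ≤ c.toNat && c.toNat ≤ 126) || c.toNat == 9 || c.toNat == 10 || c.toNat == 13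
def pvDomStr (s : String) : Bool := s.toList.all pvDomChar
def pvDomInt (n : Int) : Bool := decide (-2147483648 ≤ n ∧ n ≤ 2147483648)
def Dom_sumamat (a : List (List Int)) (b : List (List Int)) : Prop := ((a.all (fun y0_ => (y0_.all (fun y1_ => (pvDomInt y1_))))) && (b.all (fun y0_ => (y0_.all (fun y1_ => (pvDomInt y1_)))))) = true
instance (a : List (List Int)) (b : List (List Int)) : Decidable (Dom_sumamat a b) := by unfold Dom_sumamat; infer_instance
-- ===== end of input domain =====

-- B replaces A's fused row-major nested loop by a two-pass column-major build-then-transpose (alternative decomposition, same cost).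

-- ===== PORT A =====
def sumamat (a : List (List Int)) (b : List (List Int)) : List (List Int) :=
  (PySem.List.pyRange 0 a.length 1).foldl (fun matriz i =>
    matriz ++ [(PySem.List.pyRange 0 (PySem.List.pyGetD a 0 []).length 1).foldl (fun lista j =>
      lista ++ [PySem.List.pyGetD (PySem.List.pyGetD a i []) j 0
                + PySem.List.pyGetD (PySem.List.pyGetD b j []) i 0]) []]) []

-- ===== PORT B =====
def sumamat_alt (a : List (List Int)) (b : List (List Int)) : List (List Int) :=
  if a = [] then []
  else
    let n : Int := a.length
    let m : Int := (PySem.List.pyGetD a 0 []).length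
    let cols := (PySem.List.pyRange 0 m 1).map (fun j =>
      (PySem.List.pyRange 0 n 1).map (fun i =>
        PySem.List.pyGetD (PySem.List.pyGetD a i []) j 0
        + PySem.List.pyGetD (PySem.List.pyGetD b j []) i 0))
    (PySem.List.pyRange 0 n 1).map (fun i =>
      (PySem.List.pyRange 0 m 1).map (fun j =>
        PySem.List.pyGetD (PySem.List.pyGetD cols j []) i 0))

-- ===== PRECONDITION & SPEC =====
-- Pre_ excludes exactly the inputs where Python A raises an IndexError:
-- a nonempty needs every row of a at least len(a[0]) long, b at least len(a[0])
-- rows long, and each of the first len(a[0]) rows of b at least len(a) long.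
def Pre_sumamat (a : List (List Int)) (b : List (List Int)) : Prop :=
  a = [] ∨
    ((a.headD []).length ≤ b.length ∧
     (∀ r ∈ a, (a.headD []).length ≤ r.length) ∧
     (∀ c ∈ b.take (a.headD []).length, a.length ≤ c.length))
instance (a : List (List Int)) (b : List (List Int)) : Decidable (Pre_sumamat a b) := by unfold Pre_sumamat; infer_instance
def pvWitness_sumamat : List (List Int) × List (List Int) := ([[1, 2], [3, 4]], [[5, 6], [7, 8]])

def Spec_sumamat (a : List (List Int)) (b : List (List Int)) (out : List (List Int)) : Prop := out = sumamat_alt a b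
instance (a : List (List Int)) (b : List (List Int)) (out : List (List Int)) : Decidable (Spec_sumamat a b out) := by unfold Spec_sumamat; infer_instance

-- ===== CLAIM (what is proved, stated in full; the proofs are below) =====
def Claim_equal_sumamat : Prop := ∀ (a : List (List Int)) (b : List (List Int)), Dom_sumamat a b → Pre_sumamat a b → Spec_sumamat a b (sumamat a b)

-- ===== LEMMAS AND PROOFS =====

-- ===== VERDICT (by name: the statement is the Claim_ definition above) =====
theorem sumamat_spec : Claim_equal_sumamat := by
  intro a b _ _
  unfold Spec_sumamat sumamat sumamat_alt
  by_cases h : a = []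
  · subst h
    simp [PySem.List.pyRange_one_eq_nil]
  · simp only [h, PySem.List.foldl_append_singleton_eq_map, List.nil_append, if_false]
    apply List.map_congr_left
    intro i hi
    apply List.map_congr_left
    intro j hj
    rw [PySem.List.mem_pyRange_one] at hi hj
    rw [PySem.List.pyGetD_map_pyRange_of_nonneg _ _ _ _ hj.1 hj.2,
        PySem.List.pyGetD_map_pyRange_of_nonneg _ _ _ _ hi.1 hi.2]
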